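-- pv_equiv track=rewrite | github.com/EduardoRaffo/flet-sales-manager | core/importer.py | _build_header_map
-- ===== SOURCE A (Python) =====
-- import unicodedata
--
-- HEADER_ALIASES = {
--     "cliente": "client_name",
--     "nombre cliente": "client_name",
--     "nombre": "client_name",
--     "client_name": "client_name",  # ← AÑADE ESTA LÍNEA
--     "identificador del cliente": "client_id",
--     "cliente id": "client_id",
--     "id cliente": "client_id",
--     "identificador": "client_id",
--     "client_id": "client_id",  # ← AÑADE ESTA LÍNEA
--     "tipo de producto": "product_type",
--     "producto": "product_type",
--     "tipo producto": "product_type",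
--     "tipo": "product_type",
--     "product_type": "product_type",  # ← AÑADE ESTA LÍNEA
--     "precio": "price",
--     "importe": "price",
--     "price": "price",  # ← AÑADE ESTA LÍNEA
--     "fecha": "date",
--     "date": "date",
-- }
--
-- def _normalise_header(h: str) -> str:
--     """
--     Normaliza encabezados eliminando:
--     - BOM (\ufeff)
--     - NBSP (\xa0)
--     - acentos invisibles
--     - espacios duplicados
--     - mayúsculas/minúsculas
--     """
--     if not h:
--         return ""
--
--     # Normalización unicode (elimina acentos invisibles)
--     h = unicodedata.normalize("NFKD", h)
--
--     # Quitar BOM y espacios NBSP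
--     h = h.replace("\ufeff", "").replace("\xa0", " ")
--
--     # Trim, minúsculas, collapse spaces
--     return " ".join(h.strip().lower().split())
--
-- def _build_header_map(headers):
--     """
--     Construye dict: logical_name -> real_header_name
--     según los alias definidos.
--     """
--     logical_to_real = {}
--     for real in headers:
--         if real is None:
--             continue
--         key = _normalise_header(real)
--         if key in HEADER_ALIASES:
--             logical = HEADER_ALIASES[key]
--             if logical not in logical_to_real:
--                 logical_to_real[logical] = real
--     return logical_to_real
-- ===== SOURCE B (Python) =====
-- import unicodedata
--
-- # Alias table grouped by logical field (same content as HEADER_ALIASES, inverted).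
-- FIELD_GROUPS = [
--     ("client_name", ("cliente", "nombre cliente", "nombre", "client_name")),
--     ("client_id", ("identificador del cliente", "cliente id", "id cliente",
--                    "identificador", "client_id")),
--     ("product_type", ("tipo de producto", "producto", "tipo producto",
--                       "tipo", "product_type")),
--     ("price", ("precio", "importe", "price")),
--     ("date", ("fecha", "date")),
-- ]
--
--
-- def _normalise_header(h: str) -> str:
--     if not h:
--         return ""
--     h = unicodedata.normalize("NFKD", h)
--     h = h.replace("\ufeff", "").replace("\xa0", " ")
--     return " ".join(h.strip().lower().split())
--
--
-- def _build_header_map(headers):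
--     # Stage 1: normalize every header once.
--     norms = [None if h is None else _normalise_header(h) for h in headers]
--     # Stage 2: for each logical field, first position whose key is one of its aliases.
--     found = []
--     for logical, aliases in FIELD_GROUPS:
--         for i, h in enumerate(headers):
--             if h is not None and norms[i] in aliases:
--                 found.append((i, logical, h))
--                 break
--     # Stage 3: recover first-occurrence order, then build the mapping.
--     found.sort(key=lambda t: t[0])
--     return {logical: real for _, logical, real in found}
-- ===== Notes on version B (the rewrite author's own statement) =====
-- stated objective: alternative
-- what changed: Replaces A's single forward fold over headers into a dict keyed by alias lookups with a staged field-directed search: B pre-normalizes all headers once, then for each of the five logical fields (alias table inverted into per-field groups) scans for the first header whose normalized key is one of that field's aliases, sorts the matches by header position and builds the mapping from them.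
import Mathlib
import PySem

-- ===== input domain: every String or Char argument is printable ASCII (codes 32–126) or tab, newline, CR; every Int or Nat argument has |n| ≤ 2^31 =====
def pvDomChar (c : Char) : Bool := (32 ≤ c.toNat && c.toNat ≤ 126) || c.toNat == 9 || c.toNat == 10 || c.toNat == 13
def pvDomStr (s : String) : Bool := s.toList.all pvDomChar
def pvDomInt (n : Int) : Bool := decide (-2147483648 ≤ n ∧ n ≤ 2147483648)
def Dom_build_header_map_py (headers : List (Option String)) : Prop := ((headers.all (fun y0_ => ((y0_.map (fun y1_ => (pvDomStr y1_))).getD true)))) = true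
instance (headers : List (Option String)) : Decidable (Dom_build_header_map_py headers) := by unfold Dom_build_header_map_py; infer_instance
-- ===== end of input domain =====

-- B replaces A's single forward fold over headers (dict alias->logical) with a staged, field-directed
-- search over the inverted alias table (per-field groups), then a sort by position; same return value.

-- ===== PORT A =====
-- the module constant HEADER_ALIASES as Source A writes it
def pvAliases : PySem.Dict String String := PySem.Dict.mk
  [("cliente", "client_name"), ("nombre cliente", "client_name"), ("nombre", "client_name"),
   ("client_name", "client_name"),
   ("identificador del cliente", "client_id"), ("cliente id", "client_id"), ("id cliente", "client_id"),
   ("identificador", "client_id"), ("client_id", "client_id"),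
   ("tipo de producto", "product_type"), ("producto", "product_type"), ("tipo producto", "product_type"),
   ("tipo", "product_type"), ("product_type", "product_type"),
   ("precio", "price"), ("importe", "price"), ("price", "price"),
   ("fecha", "date"), ("date", "date")]

-- _normalise_header (identical function in Source A and Source B).  unicodedata.normalize("NFKD", h) is the
-- identity on the stated ASCII domain and is therefore omitted; the remaining steps are ported exactly.
def pvNorm (h : String) : String :=
  if h = "" then ""
  else
    let h1 := PySem.Str.replace (PySem.Str.replace h "\uFEFF" "") "\u00A0" " "
    PySem.Str.join " " (PySem.Str.split₀ (PySem.Str.lower (PySem.Str.strip h1)))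

def build_header_map_py (headers : List (Option String)) : List (String × String) :=
  (headers.foldl
    (fun d real =>
      match real with
      | none => d
      | some r =>
        match PySem.Dict.get? pvAliases (pvNorm r) with
        | none => d
        | some logical => if d.contains logical then d else d.insert logical r)
    PySem.Dict.empty).items

-- ===== PORT B =====
-- the module constant FIELD_GROUPS as Source B writes it (alias table inverted, grouped per logical field)
def pvGroups : List (String × List String) :=
  [("client_name", ["cliente", "nombre cliente", "nombre", "client_name"]),
   ("client_id", ["identificador del cliente", "cliente id", "id cliente",
                  "identificador", "client_id"]),
   ("product_type", ["tipo de producto", "producto", "tipo producto",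
                     "tipo", "product_type"]),
   ("price", ["precio", "importe", "price"]),
   ("date", ["fecha", "date"])]

-- B's inner loop: first position/header (scanning headers zipped with the precomputed norms,
-- which align index-for-index) whose normalized key is one of the group's aliases
def pvScan (hs : List (Option String × Option String)) (al : List String) (i : Nat) :
    Option (Nat × String) :=
  match hs with
  | [] => none
  | (some h, some key) :: t => if key ∈ al then some (i, h) else pvScan t al (i + 1)
  | _ :: t => pvScan t al (i + 1)

def build_header_map_py_alt (headers : List (Option String)) : List (String × String) :=
  let norms := headers.map (fun h => h.map pvNorm)
  let found := pvGroups.filterMap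
    (fun g => (pvScan (headers.zip norms) g.2 0).map (fun m => (m.1, g.1, m.2)))
  ((PySem.List.sorted found (fun t => t.1) false).foldl
    (fun d t => d.insert t.2.1 t.2.2) PySem.Dict.empty).items

-- ===== PRECONDITION & SPEC =====
def Spec_build_header_map_py (headers : List (Option String)) (out : List (String × String)) : Prop := out = build_header_map_py_alt headers
instance (headers : List (Option String)) (out : List (String × String)) : Decidable (Spec_build_header_map_py headers out) := by unfold Spec_build_header_map_py; infer_instance

-- ===== CLAIM (what is proved, stated in full; the proofs are below) =====
def Claim_equal_build_header_map_py : Prop := ∀ (headers : List (Option String)), Dom_build_header_map_py headers → Spec_build_header_map_py headers (build_header_map_py headers)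

-- ===== LEMMAS AND PROOFS =====

-- the logical field names, in group order
def pvKeys : List String := pvGroups.map Prod.fst

-- groups vs the flat dict: s is an alias of lg's group iff the dict maps s to lg
lemma pvGroups_get? (s lg : String) (al : List String) (h : (lg, al) ∈ pvGroups) :
    s ∈ al ↔ PySem.Dict.get? pvAliases s = some lg := by
  constructor
  · intro hs
    have hall : ∀ g ∈ pvGroups, ∀ x ∈ g.2, PySem.Dict.get? pvAliases x = some g.1 := by decide
    exact hall (lg, al) h s hs
  · intro hg
    have hm := PySem.Dict.mem_items_of_get?_eq_some pvAliases hg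
    simp only [pvGroups, List.mem_cons, List.not_mem_nil, or_false, Prod.mk.injEq] at h
    rcases h with ⟨rfl, rfl⟩ | ⟨rfl, rfl⟩ | ⟨rfl, rfl⟩ | ⟨rfl, rfl⟩ | ⟨rfl, rfl⟩ <;>
      · simp only [pvAliases, List.mem_cons, List.not_mem_nil, or_false, Prod.mk.injEq,
          String.reduceEq, and_false, and_true, false_or, or_false] at hm
        simpa using hm

lemma pvAlias_mem_keys {s lg : String} (h : PySem.Dict.get? pvAliases s = some lg) :
    lg ∈ pvKeys := by
  have hm := PySem.Dict.mem_items_of_get?_eq_some pvAliases h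
  have hv : lg ∈ PySem.Dict.values pvAliases := by
    simp only [PySem.Dict.values]
    exact List.mem_map.mpr ⟨(s, lg), hm, rfl⟩
  have : ∀ x ∈ PySem.Dict.values pvAliases, x ∈ pvKeys := by decide
  exact this lg hv

lemma pvKeys_nodup : pvKeys.Nodup := by decide

-- canonical result with positions: walk the headers, keeping the set S of still-unmatched logical names
def pvCanon : List (Option String) → List String → Nat → List (Nat × String × String)
  | [], _, _ => []
  | none :: t, S, i => pvCanon t S (i + 1)
  | some r :: t, S, i =>
    match PySem.Dict.get? pvAliases (pvNorm r) with
    | none => pvCanon t S (i + 1)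
    | some lg => if lg ∈ S then (i, lg, r) :: pvCanon t (S.erase lg) (i + 1) else pvCanon t S (i + 1)

lemma pvCanon_idx_le : ∀ (t : List (Option String)) (S : List String) (i : Nat),
    ∀ x ∈ pvCanon t S i, i ≤ x.1 := by
  intro t
  induction t with
  | nil => intro S i x hx; simp [pvCanon] at hx
  | cons h t ih =>
    intro S i x hx
    match h with
    | none =>
      have := ih S (i + 1) x (by simpa [pvCanon] using hx)
      omega
    | some r =>
      cases halias : PySem.Dict.get? pvAliases (pvNorm r) with
      | none =>
        simp only [pvCanon, halias] at hx
        have := ih S (i + 1) x hx; omega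
      | some lg =>
        simp only [pvCanon, halias] at hx
        by_cases hS : lg ∈ S
        · rw [if_pos hS] at hx
          rcases List.mem_cons.mp hx with rfl | hx
          · exact le_refl _
          · have := ih (S.erase lg) (i + 1) x hx; omega
        · rw [if_neg hS] at hx
          have := ih S (i + 1) x hx; omega

lemma pvCanon_pairwise : ∀ (t : List (Option String)) (S : List String) (i : Nat),
    (pvCanon t S i).Pairwise (fun a b => a.1 < b.1) := by
  intro t
  induction t with
  | nil => intro S i; simp [pvCanon]
  | cons h t ih =>
    intro S i
    match h with
    | none => simpa [pvCanon] using ih S (i + 1)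
    | some r =>
      cases halias : PySem.Dict.get? pvAliases (pvNorm r) with
      | none => simp only [pvCanon, halias]; exact ih S (i + 1)
      | some lg =>
        simp only [pvCanon, halias]
        by_cases hS : lg ∈ S
        · rw [if_pos hS]
          refine List.Pairwise.cons ?_ (ih (S.erase lg) (i + 1))
          intro x hx
          have := pvCanon_idx_le t (S.erase lg) (i + 1) x hx
          omega
        · rw [if_neg hS]; exact ih S (i + 1)

lemma pvCanon_key_mem : ∀ (t : List (Option String)) (S : List String) (i : Nat),
    ∀ x ∈ pvCanon t S i, x.2.1 ∈ S := by
  intro t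
  induction t with
  | nil => intro S i x hx; simp [pvCanon] at hx
  | cons h t ih =>
    intro S i x hx
    match h with
    | none => exact ih S (i + 1) x (by simpa [pvCanon] using hx)
    | some r =>
      cases halias : PySem.Dict.get? pvAliases (pvNorm r) with
      | none =>
        simp only [pvCanon, halias] at hx
        exact ih S (i + 1) x hx
      | some lg =>
        simp only [pvCanon, halias] at hx
        by_cases hS : lg ∈ S
        · rw [if_pos hS] at hx
          rcases List.mem_cons.mp hx with rfl | hx
          · exact hS
          · exact (List.mem_of_mem_erase (ih (S.erase lg) (i + 1) x hx))
        · rw [if_neg hS] at hx; exact ih S (i + 1) x hx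

lemma pvCanon_keys_nodup : ∀ (t : List (Option String)) (S : List String) (i : Nat),
    S.Nodup → ((pvCanon t S i).map (fun x => x.2.1)).Nodup := by
  intro t
  induction t with
  | nil => intro S i _; simp [pvCanon]
  | cons h t ih =>
    intro S i hS
    match h with
    | none => simpa [pvCanon] using ih S (i + 1) hS
    | some r =>
      cases halias : PySem.Dict.get? pvAliases (pvNorm r) with
      | none => simp only [pvCanon, halias]; exact ih S (i + 1) hS
      | some lg =>
        simp only [pvCanon, halias]
        by_cases hmem : lg ∈ S
        · rw [if_pos hmem]
          simp only [List.map_cons]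
          refine List.Nodup.cons ?_ (ih (S.erase lg) (i + 1) (hS.erase lg))
          intro hcon
          rcases List.mem_map.mp hcon with ⟨x, hx, hxeq⟩
          have hxS := pvCanon_key_mem t (S.erase lg) (i + 1) x hx
          rw [hxeq] at hxS
          exact ((hS.mem_erase_iff).mp hxS).1 rfl
        · rw [if_neg hmem]; exact ih S (i + 1) hS

-- A's fold over headers, started from any dict whose keys complement S
lemma pvFoldA : ∀ (t : List (Option String)) (d : PySem.Dict String String) (S : List String) (i : Nat),
    S.Nodup →
    (∀ lg ∈ pvKeys, (lg ∈ S ↔ d.contains lg = false)) →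
    (t.foldl
      (fun d real =>
        match real with
        | none => d
        | some r =>
          match PySem.Dict.get? pvAliases (pvNorm r) with
          | none => d
          | some logical => if d.contains logical then d else d.insert logical r)
      d).items = d.items ++ (pvCanon t S i).map (fun x => (x.2.1, x.2.2)) := by
  intro t
  induction t with
  | nil => intro d S i _ _; simp [pvCanon]
  | cons h t ih =>
    intro d S i hS hinv
    match h with
    | none => simpa [pvCanon] using ih d S (i + 1) hS hinv
    | some r =>
      cases halias : PySem.Dict.get? pvAliases (pvNorm r) with
      | none =>
        simp only [List.foldl_cons, pvCanon, halias]
        exact ih d S (i + 1) hS hinv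
      | some lg =>
        have hlgL : lg ∈ pvKeys := pvAlias_mem_keys halias
        simp only [List.foldl_cons, pvCanon, halias]
        by_cases hc : d.contains lg = true
        · have hnotS : lg ∉ S := by
            intro hmem
            rw [(hinv lg hlgL).mp hmem] at hc
            exact Bool.false_ne_true hc
          rw [if_neg hnotS, if_pos hc]
          exact ih d S (i + 1) hS hinv
        · have hcf : d.contains lg = false := by
            cases hh : d.contains lg
            · rfl
            · exact absurd hh hc
          have hmemS : lg ∈ S := (hinv lg hlgL).mpr hcf
          rw [if_pos hmemS, if_neg hc]
          have hinv' : ∀ lg' ∈ pvKeys, (lg' ∈ S.erase lg ↔ (d.insert lg r).contains lg' = false) := by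
            intro lg' hlg'
            rw [hS.mem_erase_iff, PySem.Dict.contains_insert]
            constructor
            · rintro ⟨hne, hmem⟩
              simp [hne, (hinv lg' hlg').mp hmem]
            · intro hb
              simp only [Bool.or_eq_false_iff, beq_eq_false_iff_ne] at hb
              exact ⟨hb.1, (hinv lg' hlg').mpr hb.2⟩
          have := ih (d.insert lg r) (S.erase lg) (i + 1) (hS.erase lg) hinv'
          rw [this, PySem.Dict.items_insert_of_not_contains (h := hcf)]
          simp

-- erasing a pair from a key-nodup association list erases its key
lemma pvMapFstErase : ∀ (G : List (String × List String)) (g0 : String × List String),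
    (G.map Prod.fst).Nodup → g0 ∈ G →
    (G.erase g0).map Prod.fst = (G.map Prod.fst).erase g0.1 := by
  intro G
  induction G with
  | nil => intro g0 _ h; simp at h
  | cons g G ih =>
    intro g0 hnd hmem
    by_cases hge : g = g0
    · subst hge
      simp [List.erase_cons_head]
    · have hgm : g0 ∈ G := by
        rcases List.mem_cons.mp hmem with h | h
        · exact absurd h.symm hge
        · exact h
      rw [List.map_cons] at hnd
      obtain ⟨h1, h2⟩ := List.nodup_cons.mp hnd
      have hne1 : g.1 ≠ g0.1 := fun he => h1 (he ▸ List.mem_map.mpr ⟨g0, hgm, rfl⟩)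
      rw [List.erase_cons_tail (by simpa using hge), List.map_cons, List.map_cons,
        List.erase_cons_tail (by simpa using hne1), ih g0 h2 hgm]

-- B's gathered matches, over any key-nodup sub-collection of groups, are a permutation of pvCanon
lemma pvPermB : ∀ (t : List (Option String)) (G : List (String × List String)) (i : Nat),
    (∀ g ∈ G, g ∈ pvGroups) → (G.map Prod.fst).Nodup →
    (G.filterMap
      (fun g => (pvScan (t.zip (t.map (fun h => h.map pvNorm))) g.2 i).map
        (fun m => (m.1, g.1, m.2)))).Perm
      (pvCanon t (G.map Prod.fst) i) := by
  intro t
  induction t with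
  | nil =>
    intro G i _ _
    simp [pvScan, pvCanon]
  | cons h t ih =>
    intro G i hsub hnd
    match h with
    | none => simpa [pvScan, pvCanon] using ih G (i + 1) hsub hnd
    | some r =>
      cases halias : PySem.Dict.get? pvAliases (pvNorm r) with
      | none =>
        simp only [pvCanon, halias, List.map_cons, Option.map_some, List.zip_cons_cons, pvScan]
        have hcongr : G.filterMap
            (fun g => ((if pvNorm r ∈ g.2 then some (i, r)
                        else pvScan (t.zip (t.map (fun h => h.map pvNorm))) g.2 (i + 1)).map
              (fun m => (m.1, g.1, m.2))))
            = G.filterMap (fun g => (pvScan (t.zip (t.map (fun h => h.map pvNorm))) g.2 (i + 1)).map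
                (fun m => (m.1, g.1, m.2))) := by
          refine List.filterMap_congr ?_
          intro g hg
          have hnm : pvNorm r ∉ g.2 := by
            intro hmm
            have := (pvGroups_get? (pvNorm r) g.1 g.2 (by simpa using hsub g hg)).mp hmm
            rw [halias] at this
            simp at this
          rw [if_neg hnm]
        rw [hcongr]
        exact ih G (i + 1) hsub hnd
      | some lg0 =>
        simp only [pvCanon, halias, List.map_cons, Option.map_some, List.zip_cons_cons, pvScan]
        by_cases hmem : lg0 ∈ G.map Prod.fst
        · rw [if_pos hmem]
          rcases List.mem_map.mp hmem with ⟨g0, hg0, hg0k⟩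
          have hg0G : g0 ∈ pvGroups := hsub g0 hg0
          have hGnd : G.Nodup := List.Nodup.of_map _ hnd
          have hperm : G.Perm (g0 :: G.erase g0) := List.perm_cons_erase hg0
          refine ((hperm.filterMap _).trans ?_)
          have hin : pvNorm r ∈ g0.2 :=
            (pvGroups_get? (pvNorm r) g0.1 g0.2 (by simpa using hg0G)).mpr (hg0k ▸ halias)
          simp only [List.filterMap_cons, if_pos hin, Option.map_some]
          have hcongr : (G.erase g0).filterMap
              (fun g => ((if pvNorm r ∈ g.2 then some (i, r)
                          else pvScan (t.zip (t.map (fun h => h.map pvNorm))) g.2 (i + 1)).map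
                (fun m => (m.1, g.1, m.2))))
              = (G.erase g0).filterMap
                  (fun g => (pvScan (t.zip (t.map (fun h => h.map pvNorm))) g.2 (i + 1)).map
                    (fun m => (m.1, g.1, m.2))) := by
            refine List.filterMap_congr ?_
            intro g hg
            have hgG : g ∈ G := List.mem_of_mem_erase hg
            have hgne : g ≠ g0 := ((hGnd.mem_erase_iff).mp hg).1
            have hkne : g.1 ≠ lg0 := by
              intro he
              exact hgne (List.inj_on_of_nodup_map hnd hgG hg0 (he.trans hg0k.symm))
            have hnm : pvNorm r ∉ g.2 := by
              intro hmm
              have := (pvGroups_get? (pvNorm r) g.1 g.2 (by simpa using hsub g hgG)).mp hmm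
              rw [halias] at this
              injection this with hji
              exact hkne hji.symm
            rw [if_neg hnm]
          rw [hcongr, hg0k]
          refine List.Perm.cons _ ?_
          have hnd' : ((G.erase g0).map Prod.fst).Nodup := by
            rw [pvMapFstErase G g0 hnd hg0]
            exact List.Nodup.erase _ hnd
          have := ih (G.erase g0) (i + 1) (fun g hg => hsub g (List.mem_of_mem_erase hg)) hnd'
          rwa [pvMapFstErase G g0 hnd hg0, hg0k] at this
        · rw [if_neg hmem]
          have hcongr : G.filterMap
              (fun g => ((if pvNorm r ∈ g.2 then some (i, r)
                          else pvScan (t.zip (t.map (fun h => h.map pvNorm))) g.2 (i + 1)).map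
                (fun m => (m.1, g.1, m.2))))
              = G.filterMap (fun g => (pvScan (t.zip (t.map (fun h => h.map pvNorm))) g.2 (i + 1)).map
                  (fun m => (m.1, g.1, m.2))) := by
            refine List.filterMap_congr ?_
            intro g hg
            have hnm : pvNorm r ∉ g.2 := by
              intro hmm
              have := (pvGroups_get? (pvNorm r) g.1 g.2 (by simpa using hsub g hg)).mp hmm
              rw [halias] at this
              injection this with hji
              exact hmem (by rw [hji]; exact List.mem_map.mpr ⟨g, hg, rfl⟩)
            rw [if_neg hnm]
          rw [hcongr]
          exact ih G (i + 1) hsub hnd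

-- ===== VERDICT (by name: the statement is the Claim_ definition above) =====
theorem build_header_map_py_spec : Claim_equal_build_header_map_py := by
  intro headers _
  unfold Spec_build_header_map_py build_header_map_py build_header_map_py_alt
  have hA := pvFoldA headers PySem.Dict.empty pvKeys 0 pvKeys_nodup
    (by intro lg hlg; simp [PySem.Dict.contains_empty, hlg])
  have hperm := pvPermB headers pvGroups 0 (fun g hg => hg) pvKeys_nodup
  have hsort : PySem.List.sorted
      (pvGroups.filterMap
        (fun g => (pvScan (headers.zip (headers.map (fun h => h.map pvNorm))) g.2 0).map
          (fun m => (m.1, g.1, m.2))))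
      (fun t => t.1) false = pvCanon headers pvKeys 0 :=
    PySem.List.sorted_eq_of_perm_of_pairwise_lt _ _ _
      hperm.symm (pvCanon_pairwise headers pvKeys 0)
  have hfresh : ∀ a ∈ pvCanon headers pvKeys 0,
      (PySem.Dict.empty : PySem.Dict String String).contains a.2.1 = false := by
    intro a _; exact PySem.Dict.contains_empty _
  have hkeys : ((pvCanon headers pvKeys 0).map (fun x => x.2.1)).Nodup :=
    pvCanon_keys_nodup headers pvKeys 0 pvKeys_nodup
  have hB := PySem.Dict.items_foldl_insert_fresh (pvCanon headers pvKeys 0)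
    (k := fun t => t.2.1) (v := fun t => t.2.2) (d := PySem.Dict.empty) hfresh hkeys
  simp only [hA, hsort, hB]
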